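-- pv_equiv track=rewrite | github.com/nipun-dhiman/logDefend | test.py | classify_traffic
-- ===== SOURCE A (Python) =====
-- def classify_traffic(referrer):
--     if '-' in referrer and len(referrer) < 2:
--         return 'direct'
--     elif any(keyword in referrer.lower() for keyword in ['google', 'bing', 'yahoo','yandex','baidu','torob','search']):
--         return 'search'
--     elif any(keyword in referrer.lower() for keyword in ['facebook', 'twitter', 'linkedin','instagram','pinterest','youtube','reddit','ask','telegram']):
--         return 'social'
--     else:
--         return 'other'
-- ===== SOURCE B (Python) =====
-- BY_FIRST = {
--     'g': (('google', 'search'),),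
--     'b': (('bing', 'search'), ('baidu', 'search')),
--     'y': (('yahoo', 'search'), ('yandex', 'search'), ('youtube', 'social')),
--     't': (('torob', 'search'), ('twitter', 'social'), ('telegram', 'social')),
--     's': (('search', 'search'),),
--     'f': (('facebook', 'social'),),
--     'l': (('linkedin', 'social'),),
--     'i': (('instagram', 'social'),),
--     'p': (('pinterest', 'social'),),
--     'r': (('reddit', 'social'),),
--     'a': (('ask', 'social'),),
-- }
--
--
-- def classify_traffic(referrer):
--     if '-' in referrer and len(referrer) < 2:
--         return 'direct'
--     low = referrer.lower()
--     search_hit = False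
--     social_hit = False
--     for i, ch in enumerate(low):
--         for kw, cat in BY_FIRST.get(ch, ()):
--             if low.startswith(kw, i):
--                 if cat == 'search':
--                     search_hit = True
--                 else:
--                     social_hit = True
--     return 'search' if search_hit else 'social' if social_hit else 'other'
-- ===== Notes on version B (the rewrite author's own statement) =====
-- stated objective: alternative
-- what changed: Replaced A's per-keyword substring searches in an elif chain by one left-to-right scan of the lowercased string that matches all keywords at each position via a dict indexed by first letter, collecting category hits and resolving search-before-social priority at the end.
import Mathlib
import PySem

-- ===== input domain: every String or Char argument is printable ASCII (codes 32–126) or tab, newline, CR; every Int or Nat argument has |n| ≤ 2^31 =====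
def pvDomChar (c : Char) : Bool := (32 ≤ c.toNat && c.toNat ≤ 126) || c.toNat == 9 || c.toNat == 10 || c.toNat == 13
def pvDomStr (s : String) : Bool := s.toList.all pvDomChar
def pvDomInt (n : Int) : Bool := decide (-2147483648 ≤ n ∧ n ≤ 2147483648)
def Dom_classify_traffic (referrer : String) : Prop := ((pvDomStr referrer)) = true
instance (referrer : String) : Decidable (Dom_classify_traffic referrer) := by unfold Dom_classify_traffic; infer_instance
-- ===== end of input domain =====

-- B replaces A's per-keyword elif substring chain by one left-to-right scan of the lowercased string with a first-letter keyword dict, collecting category hits and resolving priority at the end (objective: alternative algorithm, no speed claim).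


-- ===== PORT A =====
def classify_traffic (referrer : String) : String :=
  if PySem.Str.isIn "-" referrer && decide (PySem.Str.len referrer < 2) then "direct"
  else if ["google", "bing", "yahoo", "yandex", "baidu", "torob", "search"].any
      (fun keyword => PySem.Str.isIn keyword (PySem.Str.lower referrer)) then "search"
  else if ["facebook", "twitter", "linkedin", "instagram", "pinterest", "youtube", "reddit", "ask", "telegram"].any
      (fun keyword => PySem.Str.isIn keyword (PySem.Str.lower referrer)) then "social"
  else "other"

-- ===== PORT B =====
-- B: BY_FIRST maps a first letter to the (keyword, category) patterns starting with it.
def pvByFirst : PySem.Dict Char (List (String × String)) :=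
  PySem.Dict.mk [
    ('g', [("google", "search")]),
    ('b', [("bing", "search"), ("baidu", "search")]),
    ('y', [("yahoo", "search"), ("yandex", "search"), ("youtube", "social")]),
    ('t', [("torob", "search"), ("twitter", "social"), ("telegram", "social")]),
    ('s', [("search", "search")]),
    ('f', [("facebook", "social")]),
    ('l', [("linkedin", "social")]),
    ('i', [("instagram", "social")]),
    ('p', [("pinterest", "social")]),
    ('r', [("reddit", "social")]),
    ('a', [("ask", "social")])]

-- low.startswith(kw, i) with 0 ≤ i is ported exactly as a prefix test on low.drop i.
def classify_traffic_alt (referrer : String) : String :=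
  if PySem.Str.isIn "-" referrer && decide (PySem.Str.len referrer < 2) then "direct"
  else
    let low := (PySem.Str.lower referrer).toList
    let flags := (PySem.List.enumerate low).foldl (fun fl p =>
      (PySem.Dict.getD pvByFirst p.2 []).foldl (fun fl kc =>
        if PySem.Chars.startswith (low.drop p.1.toNat) kc.1.toList then
          if kc.2 == "search" then (true, fl.2) else (fl.1, true)
        else fl) fl) (false, false)
    if flags.1 then "search" else if flags.2 then "social" else "other"

-- ===== PRECONDITION & SPEC =====
def Spec_classify_traffic (referrer : String) (out : String) : Prop := out = classify_traffic_alt referrer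
instance (referrer : String) (out : String) : Decidable (Spec_classify_traffic referrer out) := by unfold Spec_classify_traffic; infer_instance

-- ===== CLAIM (what is proved, stated in full; the proofs are below) =====
def Claim_equal_classify_traffic : Prop := ∀ (referrer : String), Dom_classify_traffic referrer → Spec_classify_traffic referrer (classify_traffic referrer)

-- ===== LEMMAS AND PROOFS =====

-- inner loop over the patterns of one letter: an or-accumulation of the two flags
lemma pv_inner_fold (pairs : List (String × String)) (fl : Bool × Bool) (P : String × String → Bool) :
    pairs.foldl (fun fl kc =>
        if P kc then (if kc.2 == "search" then (true, fl.2) else (fl.1, true)) else fl) fl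
    = (fl.1 || pairs.any (fun kc => P kc && kc.2 == "search"),
       fl.2 || pairs.any (fun kc => P kc && !(kc.2 == "search"))) := by
  induction pairs generalizing fl with
  | nil => simp
  | cons kc rest ih =>
    simp only [List.foldl_cons, List.any_cons]
    rw [ih]
    by_cases hP : P kc <;> by_cases hc : kc.2 == "search" <;>
      simp [hP, hc, Bool.or_comm]

-- outer loop: a pairwise or-fold is a pair of `any`s
lemma pv_pair_fold {α : Type} (l : List α) (fl : Bool × Bool) (P Q : α → Bool) :
    l.foldl (fun fl x => (fl.1 || P x, fl.2 || Q x)) fl = (fl.1 || l.any P, fl.2 || l.any Q) := by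
  induction l generalizing fl with
  | nil => simp
  | cons x rest ih => simp [ih, Bool.or_assoc]

-- anything the dict hands out is one of its stored values
lemma pv_getD_sub {κ ν : Type} [BEq κ] (l : List (κ × List ν)) (k : κ) (x : ν)
    (h : x ∈ PySem.Dict.getD (PySem.Dict.mk l) k []) : ∃ p ∈ l, x ∈ p.2 := by
  induction l with
  | nil => simp [PySem.Dict.getD, PySem.Dict.get?] at h
  | cons hd tl ih =>
    rw [PySem.Dict.getD, PySem.Dict.get?_mk_cons] at h
    by_cases hk : hd.1 == k
    · simp only [hk, if_true, Option.getD_some] at h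
      exact ⟨hd, by simp, h⟩
    · simp only [hk, if_false, Bool.false_eq_true] at h
      obtain ⟨p, hp, hx⟩ := ih (by rw [PySem.Dict.getD]; exact h)
      exact ⟨p, by simp [hp], hx⟩
    
-- hence one of the 16 literal patterns
lemma pv_dict_sub (ch : Char) (kc : String × String)
    (h : kc ∈ PySem.Dict.getD pvByFirst ch []) :
    kc ∈ [("google", "search"), ("bing", "search"), ("baidu", "search"),
          ("yahoo", "search"), ("yandex", "search"), ("youtube", "social"),
          ("torob", "search"), ("twitter", "social"), ("telegram", "social"),
          ("search", "search"), ("facebook", "social"), ("linkedin", "social"),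
          ("instagram", "social"), ("pinterest", "social"), ("reddit", "social"),
          ("ask", "social")] := by
  obtain ⟨p, hp, hx⟩ := pv_getD_sub _ ch kc h
  fin_cases hp <;> simp_all <;> tauto

-- a prefix match found at some scan position is a substring occurrence
lemma pv_isIn_of_hit (low : List Char) (kw : String) (j : Nat)
    (hsw : PySem.Chars.startswith (low.drop j) kw.toList = true) :
    PySem.Chars.isIn kw.toList low = true := by
  rw [← PySem.Chars.exists_prefix_drop_iff_isIn]
  exact ⟨j, (PySem.Chars.startswith_iff _ _).mp hsw⟩

-- a substring occurrence is found by the scan at some position, via the first-letter dict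
lemma pv_hit_of_isIn (low : List Char) (kw cat : String)
    (hne : kw.toList ≠ [])
    (hmem : (kw, cat) ∈ PySem.Dict.getD pvByFirst kw.toList.head! [])
    (hin : PySem.Chars.isIn kw.toList low = true) :
    ∃ p ∈ PySem.List.enumerate low, ∃ kc ∈ PySem.Dict.getD pvByFirst p.2 [],
      (PySem.Chars.startswith (low.drop p.1.toNat) kc.1.toList && (kc.2 == cat)) = true := by
  have hkw : kw.toList = kw.toList.head! :: kw.toList.tail := (List.cons_head!_tail hne).symm
  obtain ⟨j, hpre⟩ := (PySem.Chars.exists_prefix_drop_iff_isIn kw.toList low).mpr hin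
  have hj : j < low.length := by
    by_contra hle
    have hnil : low.drop j = [] := List.drop_eq_nil_of_le (Nat.le_of_not_lt hle)
    rw [hnil, hkw] at hpre
    simp at hpre
  obtain ⟨rest, hs⟩ := hpre
  rw [hkw] at hs
  have hc : low[j] = kw.toList.head! := by
    have h0 : (low.drop j)[0]'(by rw [← hs]; simp) = kw.toList.head! := by
      simp [← hs]
    simpa [List.getElem_drop] using h0
  refine ⟨((j : Int), low[j]), ?_, (kw, cat), ?_, ?_⟩
  · rw [PySem.List.mem_enumerate_iff]
    exact ⟨j, hj, by simp⟩
  · rw [hc]; exact hmem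
  · simp only [Bool.and_eq_true, beq_iff_eq, Int.toNat_natCast]
    refine ⟨(PySem.Chars.startswith_iff _ _).mpr ⟨rest, ?_⟩, trivial⟩
    rw [hkw]; exact hs

-- the scan's search flag is A's search `any`
lemma pv_flag_search (low : List Char) :
    ((PySem.List.enumerate low).any fun p => (PySem.Dict.getD pvByFirst p.2 []).any fun kc =>
        PySem.Chars.startswith (low.drop p.1.toNat) kc.1.toList && kc.2 == "search")
    = (["google", "bing", "yahoo", "yandex", "baidu", "torob", "search"].any
        fun kw => PySem.Chars.isIn kw.toList low) := by
  rw [Bool.eq_iff_iff]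
  simp only [List.any_eq_true]
  constructor
  · rintro ⟨p, hp, kc, hkc, hx⟩
    rw [Bool.and_eq_true] at hx
    obtain ⟨hsw, hcat⟩ := hx
    have hin := pv_isIn_of_hit low kc.1 p.1.toNat hsw
    have h16 := pv_dict_sub p.2 kc hkc
    simp only [List.mem_cons, List.not_mem_nil, or_false] at h16
    rcases h16 with h|h|h|h|h|h|h|h|h|h|h|h|h|h|h|h <;> subst h <;>
      first
        | exact absurd hcat (by decide)
        | (refine ⟨_, ?_, hin⟩; decide)
  · rintro ⟨kw, hkw, hin⟩
    simp only [List.mem_cons, List.not_mem_nil, or_false] at hkw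
    rcases hkw with h|h|h|h|h|h|h <;> subst h <;>
      · obtain ⟨p, hp, kc, hkc, hx⟩ := pv_hit_of_isIn low _ "search" (by decide) (by decide) hin
        exact ⟨p, hp, kc, hkc, hx⟩

-- the scan's social flag is A's social `any`
lemma pv_flag_social (low : List Char) :
    ((PySem.List.enumerate low).any fun p => (PySem.Dict.getD pvByFirst p.2 []).any fun kc =>
        PySem.Chars.startswith (low.drop p.1.toNat) kc.1.toList && !(kc.2 == "search"))
    = (["facebook", "twitter", "linkedin", "instagram", "pinterest", "youtube", "reddit", "ask", "telegram"].any
        fun kw => PySem.Chars.isIn kw.toList low) := by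
  rw [Bool.eq_iff_iff]
  simp only [List.any_eq_true]
  constructor
  · rintro ⟨p, hp, kc, hkc, hx⟩
    rw [Bool.and_eq_true] at hx
    obtain ⟨hsw, hcat⟩ := hx
    have hin := pv_isIn_of_hit low kc.1 p.1.toNat hsw
    have h16 := pv_dict_sub p.2 kc hkc
    simp only [List.mem_cons, List.not_mem_nil, or_false] at h16
    rcases h16 with h|h|h|h|h|h|h|h|h|h|h|h|h|h|h|h <;> subst h <;>
      first
        | exact absurd hcat (by decide)
        | (refine ⟨_, ?_, hin⟩; decide)
  · rintro ⟨kw, hkw, hin⟩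
    simp only [List.mem_cons, List.not_mem_nil, or_false] at hkw
    rcases hkw with h|h|h|h|h|h|h|h|h <;> subst h <;>
      · obtain ⟨p, hp, kc, hkc, hx⟩ := pv_hit_of_isIn low _ "social" (by decide) (by decide) hin
        rw [Bool.and_eq_true, beq_iff_eq] at hx
        exact ⟨p, hp, kc, hkc, by simp [hx.1, hx.2]⟩

-- the scan's two flags are exactly A's two `any` conditions
lemma pv_scan (low : List Char) :
    (PySem.List.enumerate low).foldl (fun fl p =>
      (PySem.Dict.getD pvByFirst p.2 []).foldl (fun fl kc =>
        if PySem.Chars.startswith (low.drop p.1.toNat) kc.1.toList then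
          if kc.2 == "search" then (true, fl.2) else (fl.1, true)
        else fl) fl) (false, false)
    = (["google", "bing", "yahoo", "yandex", "baidu", "torob", "search"].any
         (fun kw => PySem.Chars.isIn kw.toList low),
       ["facebook", "twitter", "linkedin", "instagram", "pinterest", "youtube", "reddit", "ask", "telegram"].any
         (fun kw => PySem.Chars.isIn kw.toList low)) := by
  simp only [pv_inner_fold]
  rw [pv_pair_fold]
  simp only [Bool.false_or]
  rw [Prod.mk.injEq]
  exact ⟨pv_flag_search low, pv_flag_social low⟩

theorem classify_traffic_spec : Claim_equal_classify_traffic := by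
  intro referrer _
  unfold Spec_classify_traffic classify_traffic classify_traffic_alt
  by_cases hc : (PySem.Str.isIn "-" referrer && decide (PySem.Str.len referrer < 2)) = true
  · rw [if_pos hc, if_pos hc]
  · rw [if_neg hc, if_neg hc]
    simp only [pv_scan]
    simp [PySem.Str.isIn_eq]
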